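-- pv_equiv track=rewrite | github.com/Javiramos276/Algoritmos1Haskell-Python | Practica7.py | CerosEnPosicionesPares2
-- ===== SOURCE A (Python) =====
-- def CerosEnPosicionesPares2(s:list[int])-> list[int]:
--     resultado: list = []
--     for i in range(len(s)):
--         if i % 2 == 0:
--             resultado.append(s[i])
--         else:
--             resultado.append(0)
--     return resultado
-- ===== SOURCE B (Python) =====
-- def CerosEnPosicionesPares2(s: list[int]) -> list[int]:
--     resultado = list(s)
--     resultado[1::2] = [0] * (len(s) // 2)
--     return resultado
-- ===== Notes on version B (the rewrite author's own statement) =====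
-- stated objective: idiomatic
-- what changed: Replaces the per-index if/else append loop with a bulk copy of the list plus one strided slice assignment that zeroes only the odd positions.
import Mathlib
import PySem

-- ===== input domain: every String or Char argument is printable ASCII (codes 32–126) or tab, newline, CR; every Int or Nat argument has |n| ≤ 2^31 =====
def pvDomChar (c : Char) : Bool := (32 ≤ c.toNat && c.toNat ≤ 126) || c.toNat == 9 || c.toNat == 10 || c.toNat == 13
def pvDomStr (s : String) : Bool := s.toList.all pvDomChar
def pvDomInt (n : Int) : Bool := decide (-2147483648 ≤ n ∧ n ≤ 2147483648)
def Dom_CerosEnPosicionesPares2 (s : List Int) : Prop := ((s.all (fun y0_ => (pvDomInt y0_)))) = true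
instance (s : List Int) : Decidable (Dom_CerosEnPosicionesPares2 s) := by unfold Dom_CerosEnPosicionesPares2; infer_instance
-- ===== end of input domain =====

-- B replaces A's per-index if/else append loop by a bulk copy plus one strided
-- slice assignment zeroing the odd positions (objective: idiomatic; same cost).

-- ===== PORT A =====
-- loop 'for i in range(len(s))' appending s[i] or 0; i is always in range, so
-- pyGetD with default 0 is exact here.
def CerosEnPosicionesPares2 (s : List Int) : List Int :=
  (PySem.List.pyRange 0 (s.length : Int) 1).foldl
    (fun resultado i =>
      if i % 2 == 0 then resultado ++ [PySem.List.pyGetD s i 0]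
      else resultado ++ [(0 : Int)]) []

-- ===== PORT B =====
-- hand port of the extended-slice assignment 'resultado[1::2] = zs' for the
-- equal-length case: write the k-th element of zs at index 1+2k. Exact because
-- Python's [1::2] slice of a list of length n has exactly n // 2 slots.
def pvAssignOdd : List Int → List Int → List Int
  | a :: _ :: t, z :: zs => a :: z :: pvAssignOdd t zs
  | xs, _ => xs

def CerosEnPosicionesPares2_alt (s : List Int) : List Int :=
  let resultado := s
  let zeros := List.replicate (PySem.Int.floordiv (s.length : Int) 2).toNat (0 : Int)
  pvAssignOdd resultado zeros

-- ===== PRECONDITION & SPEC =====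
def Spec_CerosEnPosicionesPares2 (s : List Int) (out : List Int) : Prop := out = CerosEnPosicionesPares2_alt s
instance (s : List Int) (out : List Int) : Decidable (Spec_CerosEnPosicionesPares2 s out) := by unfold Spec_CerosEnPosicionesPares2; infer_instance

-- ===== CLAIM (what is proved, stated in full; the proofs are below) =====
def Claim_equal_CerosEnPosicionesPares2 : Prop := ∀ (s : List Int), Dom_CerosEnPosicionesPares2 s → Spec_CerosEnPosicionesPares2 s (CerosEnPosicionesPares2 s)

-- ===== LEMMAS AND PROOFS =====

-- common two-at-a-time shape of both results
def pvG : List Int → List Int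
  | [] => []
  | [a] => [a]
  | a :: _ :: t => a :: 0 :: pvG t

lemma pvB_eq_g (s : List Int) : CerosEnPosicionesPares2_alt s = pvG s := by
  unfold CerosEnPosicionesPares2_alt
  induction s using pvG.induct with
  | case1 => simp [pvAssignOdd, pvG]
  | case2 a =>
      have h1 : (([a] : List Int).length : Int) = 1 := by simp
      have h0 : (PySem.Int.floordiv (1 : Int) 2).toNat = 0 := by decide
      rw [h1, h0]; simp [pvAssignOdd, pvG]
  | case3 a b t ih =>
      have hlen : ((a :: b :: t).length : Int) = (t.length : Int) + 2 := by
        simp; ring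
      rw [hlen]
      have h2 : PySem.Int.floordiv ((t.length : Int) + 2) 2
          = PySem.Int.floordiv (t.length : Int) 2 + 1 := by
        rw [PySem.Int.floordiv_eq_ediv_of_pos (by omega),
            PySem.Int.floordiv_eq_ediv_of_pos (by omega)]
        omega
      have hge : 0 ≤ PySem.Int.floordiv (t.length : Int) 2 := by
        rw [PySem.Int.floordiv_eq_ediv_of_pos (by omega)]; positivity
      rw [h2]
      have h3 : (PySem.Int.floordiv (t.length : Int) 2 + 1).toNat
          = (PySem.Int.floordiv (t.length : Int) 2).toNat + 1 := by omega
      rw [h3, List.replicate_succ]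
      simp only [pvAssignOdd, pvG, List.cons.injEq, true_and]
      exact ih

lemma pvA_eq_map (s : List Int) :
    CerosEnPosicionesPares2 s
      = (List.range s.length).map
          (fun (k : Nat) => if ((k : Int)) % 2 == 0 then s.getD k 0 else (0 : Int)) := by
  unfold CerosEnPosicionesPares2
  rw [PySem.List.pyRange_one]
  have hfold : ∀ (l : List Int) (acc : List Int),
      l.foldl (fun resultado i =>
        if i % 2 == 0 then resultado ++ [PySem.List.pyGetD s i 0]
        else resultado ++ [(0 : Int)]) acc
      = acc ++ l.map (fun i => if i % 2 == 0 then PySem.List.pyGetD s i 0 else 0) := by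
    intro l
    induction l with
    | nil => simp
    | cons x xs ih =>
        intro acc
        rw [List.foldl_cons, List.map_cons]
        by_cases hx : (x % 2 == 0) = true
        · rw [if_pos hx, if_pos hx, ih, List.append_assoc, List.singleton_append]
        · rw [if_neg hx, if_neg hx, ih, List.append_assoc, List.singleton_append]
  rw [hfold]
  simp only [List.nil_append, List.map_map]
  apply List.map_congr_left
  intro k _
  simp

lemma pvA_eq_g (s : List Int) : CerosEnPosicionesPares2 s = pvG s := by
  rw [pvA_eq_map]
  induction s using pvG.induct with
  | case1 => simp [pvG]
  | case2 a => simp [pvG]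
  | case3 a b t ih =>
      have hlen : (a :: b :: t).length = t.length + 2 := by simp
      rw [hlen]
      have hr : List.range (t.length + 2)
          = 0 :: 1 :: (List.range t.length).map (fun k => k + 2) := by
        rw [List.range_succ_eq_map, List.range_succ_eq_map]
        simp [List.map_map, Function.comp]
      rw [hr]
      simp only [List.map_cons, List.map_map, pvG, List.cons.injEq]
      refine ⟨by norm_num, by norm_num, ?_⟩
      rw [← ih]
      apply List.map_congr_left
      intro k _
      simp only [Function.comp_apply]
      have hpar : (((k + 2 : Nat) : Int)) % 2 = ((k : Int)) % 2 := by
        push_cast; omega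
      have hget : (a :: b :: t).getD (k + 2) 0 = t.getD k 0 := by
        simp [List.getD]
      rw [hpar, hget]

-- ===== VERDICT (by name: the statement is the Claim_ definition above) =====
theorem CerosEnPosicionesPares2_spec : Claim_equal_CerosEnPosicionesPares2 := by
  intro s _
  unfold Spec_CerosEnPosicionesPares2
  rw [pvA_eq_g, pvB_eq_g]
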